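-- pv_equiv track=rewrite | github.com/ritujadik/DSA-Problem | Jul_2025/Array/10.07.25/Split_the_array.py | splitsubarray
-- ===== SOURCE A (Python) =====
-- def splitsubarray(nums):
--     new_len = len(nums)
--     num1 = []
--     num2 = []
--     new_length = new_len//2
--
--     # while len(num1) < new_length:
--     for i in range(len(nums)):
--         if nums[i] not in num1 and len(num1) < new_length:
--             num1.append(nums[i])
--         else:
--             num2.append(nums[i])
--
--     if len(num1) == len(num2) == new_length and len(set(num1)) == new_length and len(set(num2)) == new_length:
--         return True
--     else: return False
-- ===== SOURCE B (Python) =====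
-- def splitsubarray(nums):
--     if len(nums) % 2 != 0:
--         return False
--     counts = {}
--     for x in nums:
--         counts[x] = counts.get(x, 0) + 1
--     return all(c <= 2 for c in counts.values())
-- ===== Notes on version B (the rewrite author's own statement) =====
-- stated objective: simpler
-- what changed: Replaces A's greedy element-by-element classification into two lists (with a linear membership scan per element and two set constructions at the end) by one counting pass: the array splits into two distinct halves iff its length is even and no value occurs more than twice.
-- intended difference: On even-length arrays where every value occurs at most twice but some value occurring twice is not among the first n/2 distinct values (e.g. [1,2,3,3]), A returns False although a valid split into two distinct halves exists; B returns True, which is the intended answer. — e.g. on splitsubarray([1, 2, 3, 3]): A returns false, B returns true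
import Mathlib
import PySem

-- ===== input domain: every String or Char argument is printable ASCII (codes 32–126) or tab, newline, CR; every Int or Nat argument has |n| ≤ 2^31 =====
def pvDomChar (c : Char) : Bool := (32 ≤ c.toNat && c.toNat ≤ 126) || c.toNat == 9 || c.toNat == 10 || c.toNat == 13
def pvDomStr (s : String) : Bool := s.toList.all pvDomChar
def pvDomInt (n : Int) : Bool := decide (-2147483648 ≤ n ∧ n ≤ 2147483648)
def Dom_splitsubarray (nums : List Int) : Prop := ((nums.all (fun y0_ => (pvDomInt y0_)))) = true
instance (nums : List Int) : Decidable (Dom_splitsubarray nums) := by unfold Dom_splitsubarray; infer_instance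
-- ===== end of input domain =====

-- B answers "does the array split into two distinct-element halves" by one counting
-- pass (length even and every value occurs at most twice); A's greedy classification
-- wrongly rejects some splittable arrays, stated below as an intended difference D_.

-- ===== PORT A =====
def splitsubarray (nums : List Int) : Bool :=
  let newLen : Int := PySem.List.len nums
  let newLength : Int := PySem.Int.floordiv newLen 2
  -- for i in range(len(nums)): classify nums[i] into num1 or num2
  -- (i is always a valid index, so pyGetD's default 0 is never used)
  let p := (PySem.List.pyRange 0 newLen).foldl
    (fun (s : List Int × List Int) i =>
      if !(s.1.contains (PySem.List.pyGetD nums i 0)) && decide ((s.1.length : Int) < newLength) then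
        (s.1 ++ [PySem.List.pyGetD nums i 0], s.2)
      else
        (s.1, s.2 ++ [PySem.List.pyGetD nums i 0]))
    ([], [])
  decide ((p.1.length : Int) = (p.2.length : Int) ∧ (p.2.length : Int) = newLength
    ∧ ((PySem.Set.ofList p.1).length : Int) = newLength
    ∧ ((PySem.Set.ofList p.2).length : Int) = newLength)

-- ===== PORT B =====
def splitsubarray_alt (nums : List Int) : Bool :=
  if PySem.Int.mod (PySem.List.len nums) 2 ≠ 0 then false
  else
    let counts : PySem.Dict Int Int :=
      nums.foldl (fun d x => d.insert x (d.getD x 0 + 1)) PySem.Dict.empty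
    counts.values.all (fun c => decide (c ≤ 2))

-- ===== PRECONDITION & SPEC =====
-- On even-length arrays where every value occurs at most twice but some value occurring
-- twice is not among the first n/2 distinct values, A returns False although a valid
-- split into two distinct halves exists; B returns True, the intended answer.
def D_splitsubarray (nums : List Int) : Prop :=
  nums.length % 2 = 0 ∧ (∀ v ∈ nums, nums.count v ≤ 2) ∧
  ∃ v ∈ nums, nums.count v = 2 ∧ v ∉ (PySem.Set.ofList nums).take (nums.length / 2)
instance (nums : List Int) : Decidable (D_splitsubarray nums) := by unfold D_splitsubarray; infer_instance

def Spec_splitsubarray (nums : List Int) (out : Bool) : Prop := ¬ D_splitsubarray nums → out = splitsubarray_alt nums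
instance (nums : List Int) (out : Bool) : Decidable (Spec_splitsubarray nums out) := by unfold Spec_splitsubarray; infer_instance

def pvDiffWitness_splitsubarray : List Int := [1, 2, 3, 3]
def pvDiffWitnessOut_splitsubarray : Bool × Bool := (false, true)

-- ===== CLAIM (what is proved, stated in full; the proofs are below) =====
def Claim_unchanged_splitsubarray : Prop := ∀ (nums : List Int), Dom_splitsubarray nums → Spec_splitsubarray nums (splitsubarray nums)
def Claim_changed_splitsubarray : Prop := Dom_splitsubarray (pvDiffWitness_splitsubarray) ∧ D_splitsubarray (pvDiffWitness_splitsubarray) ∧ splitsubarray (pvDiffWitness_splitsubarray) = pvDiffWitnessOut_splitsubarray.1 ∧ splitsubarray_alt (pvDiffWitness_splitsubarray) = pvDiffWitnessOut_splitsubarray.2 ∧ pvDiffWitnessOut_splitsubarray.1 ≠ pvDiffWitnessOut_splitsubarray.2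
def Claim_exact_splitsubarray : Prop := ∀ (nums : List Int), Dom_splitsubarray nums → D_splitsubarray nums → splitsubarray nums ≠ splitsubarray_alt nums

-- ===== LEMMAS AND PROOFS =====

-- The exact characterisation of A's result: the length is even, there are at least
-- n/2 distinct values, each of the first n/2 distinct values occurs at most twice
-- and every other value at most once.
def GoodSplit (nums : List Int) : Prop :=
  nums.length % 2 = 0 ∧
  nums.length / 2 ≤ (PySem.Set.ofList nums).length ∧
  ∀ v : Int, nums.count v ≤
    if v ∈ (PySem.Set.ofList nums).take (nums.length / 2) then 2 else 1

def stepA (K : Nat) (s : List Int × List Int) (x : Int) : List Int × List Int :=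
  if !(s.1.contains x) && decide ((s.1.length : Int) < ((K : Nat) : Int)) then
    (s.1 ++ [x], s.2)
  else
    (s.1, s.2 ++ [x])

lemma stepA_mem (K : Nat) (s : List Int × List Int) (x : Int) (h : x ∈ s.1) :
    stepA K s x = (s.1, s.2 ++ [x]) := by
  simp [stepA, h]

lemma stepA_new (K : Nat) (s : List Int × List Int) (x : Int) (h1 : x ∉ s.1)
    (h2 : s.1.length < K) : stepA K s x = (s.1 ++ [x], s.2) := by
  simp [stepA, h1, h2]

lemma stepA_full (K : Nat) (s : List Int × List Int) (x : Int) (h2 : ¬ s.1.length < K) :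
    stepA K s x = (s.1, s.2 ++ [x]) := by
  simp [stepA, h2]

lemma loopA_inv (K : Nat) (l : List Int) :
    (l.foldl (stepA K) ([], [])).1 = (PySem.Set.ofList l).take K ∧
    (l.foldl (stepA K) ([], [])).2.length + ((PySem.Set.ofList l).take K).length = l.length ∧
    ∀ v : Int,
      ((l.foldl (stepA K) ([], [])).2.count v) +
        (if v ∈ (PySem.Set.ofList l).take K then 1 else 0) = l.count v := by
  induction l using List.reverseRecOn with
  | nil => simp [PySem.Set.ofList_nil]
  | append_singleton l x ih =>
    obtain ⟨h1, h2, h3⟩ := ih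
    simp only [List.foldl_append, List.foldl_cons, List.foldl_nil] at *
    set r := l.foldl (stepA K) ([], []) with hr
    rw [PySem.Set.ofList_append_singleton, PySem.Set.add_eq_ite]
    by_cases hmem : x ∈ (PySem.Set.ofList l).take K
    · -- x already in num1: it goes to num2, the distinct prefix is unchanged
      have hxD : x ∈ PySem.Set.ofList l := List.mem_of_mem_take hmem
      rw [if_pos hxD, stepA_mem K r x (by rw [h1]; exact hmem)]
      refine ⟨h1, ?_, ?_⟩
      · simp only [List.length_append, List.length_cons, List.length_nil]
        omega
      · intro v
        have hv := h3 v
        by_cases hvx : v = x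
        · subst hvx
          simp only [List.count_append, List.count_singleton, if_pos hmem] at hv ⊢
          omega
        · have hc : List.count v [x] = 0 := by
            simp [List.count_singleton]; omega
          simp only [List.count_append, hc] at hv ⊢
          omega
    · by_cases hlen : ((PySem.Set.ofList l).take K).length < K
      · -- x is new and num1 still has room: it joins num1
        have hDlt : (PySem.Set.ofList l).length < K := by
          have := List.length_take (i := K) (l := PySem.Set.ofList l)
          omega
        have hTD : (PySem.Set.ofList l).take K = PySem.Set.ofList l :=
          List.take_of_length_le (by omega)
        have hxD : x ∉ PySem.Set.ofList l := by rw [← hTD]; exact hmem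
        rw [if_neg hxD,
          stepA_new K r x (by rw [h1]; exact hmem) (by rw [h1]; exact hlen),
          List.take_of_length_le (by simp only [List.length_append,
            List.length_cons, List.length_nil]; omega)]
        rw [hTD] at h1 h2 h3
        refine ⟨by rw [h1], ?_, ?_⟩
        · simp only [List.length_append, List.length_cons, List.length_nil] at h2 ⊢
          omega
        · intro v
          have hv := h3 v
          by_cases hvx : v = x
          · subst hvx
            simp [List.count_append, hxD] at hv ⊢
            omega
          · have hc : List.count v [x] = 0 := by
              simp [List.count_singleton]; omega
            have hiff : (v ∈ PySem.Set.ofList l ++ [x]) ↔ v ∈ PySem.Set.ofList l := by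
              simp [List.mem_append, hvx]
            simp only [List.count_append, hc, hiff] at hv ⊢
            omega
      · -- num1 is full: x goes to num2, take K unchanged
        have hfull : ¬ r.1.length < K := by rw [h1]; exact hlen
        have hKle : K ≤ (PySem.Set.ofList l).length := by
          have := List.length_take (i := K) (l := PySem.Set.ofList l)
          omega
        rw [stepA_full K r x hfull]
        have hT' : (if x ∈ PySem.Set.ofList l then PySem.Set.ofList l
            else PySem.Set.ofList l ++ [x]).take K = (PySem.Set.ofList l).take K := by
          split
          · rfl
          · exact List.take_append_of_le_length hKle
        rw [hT']
        refine ⟨h1, ?_, ?_⟩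
        · simp only [List.length_append, List.length_cons, List.length_nil]
          omega
        · intro v
          have hv := h3 v
          by_cases hvx : v = x
          · subst hvx
            simp only [List.count_append, List.count_singleton, if_neg hmem] at hv ⊢
            omega
          · have hc : List.count v [x] = 0 := by
              simp [List.count_singleton]; omega
            simp only [List.count_append, hc] at hv ⊢
            omega

lemma ofList_sublist (xs : List Int) : (PySem.Set.ofList xs).Sublist xs := by
  induction xs using List.reverseRecOn with
  | nil => simp [PySem.Set.ofList_nil]
  | append_singleton l x ih =>
    rw [PySem.Set.ofList_append_singleton, PySem.Set.add_eq_ite]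
    split
    · exact ih.trans (List.sublist_append_left _ _)
    · exact List.Sublist.append ih (List.Sublist.refl _)

lemma ofList_length_eq_iff (xs : List Int) :
    (PySem.Set.ofList xs).length = xs.length ↔ xs.Nodup := by
  constructor
  · intro h
    have := (ofList_sublist xs).eq_of_length h
    rw [← this]
    exact PySem.Set.nodup_ofList xs
  · intro h
    rw [PySem.Set.ofList_eq_self_of_nodup xs h]

-- A returns true exactly on GoodSplit
lemma A_true_iff (nums : List Int) : splitsubarray nums = true ↔ GoodSplit nums := by
  have hlen : PySem.List.len nums = ((nums.length : Nat) : Int) := by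
    simp [PySem.List.len]
  have hK : PySem.Int.floordiv (PySem.List.len nums) 2 = ((nums.length / 2 : Nat) : Int) := by
    rw [hlen]; exact_mod_cast PySem.Int.floordiv_natCast nums.length 2
  unfold splitsubarray
  simp only [hK]
  rw [PySem.List.foldl_pyRange_pyGetD nums 0
    (fun (s : List Int × List Int) x =>
      if !(s.1.contains x) && decide ((s.1.length : Int) < ((nums.length / 2 : Nat) : Int)) then
        (s.1 ++ [x], s.2)
      else
        (s.1, s.2 ++ [x]))
    ([], []) le_rfl]
  rw [show (fun (s : List Int × List Int) x =>
      if !(s.1.contains x) && decide ((s.1.length : Int) < ((nums.length / 2 : Nat) : Int)) then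
        (s.1 ++ [x], s.2)
      else
        (s.1, s.2 ++ [x])) = stepA (nums.length / 2) from rfl]
  simp only [Int.toNat_zero, List.drop_zero]
  unfold GoodSplit
  obtain ⟨h1, h2, h3⟩ := loopA_inv (nums.length / 2) nums
  set K := nums.length / 2 with hKdef
  set D := PySem.Set.ofList nums with hD
  set p := nums.foldl (stepA K) ([], []) with hp
  rw [decide_eq_true_iff]
  have hTlen : (D.take K).length = min K D.length := List.length_take
  have hTnodup : (D.take K).Nodup :=
    List.Nodup.sublist (List.take_sublist _ _) (PySem.Set.nodup_ofList nums)
  constructor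
  · rintro ⟨c1, c2, c3, c4⟩
    have e1 : p.1.length = p.2.length := by exact_mod_cast c1
    have e2 : p.2.length = K := by exact_mod_cast c2
    have e4 : (PySem.Set.ofList p.2).length = K := by exact_mod_cast c4
    have hTK : (D.take K).length = K := by rw [h1] at e1; omega
    have hKD : K ≤ D.length := by omega
    refine ⟨by omega, hKD, ?_⟩
    intro v
    have hnd : p.2.Nodup := (ofList_length_eq_iff p.2).mp (by omega)
    have hc1 := List.nodup_iff_count_le_one.mp hnd v
    have hv := h3 v
    by_cases hvT : v ∈ D.take K <;> simp [hvT] at hv ⊢ <;> omega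
  · rintro ⟨g1, g2, g3⟩
    have hTK : (D.take K).length = K := by omega
    have hn : nums.length = 2 * K := by omega
    have hlen2 : p.2.length = K := by omega
    have hcnt : ∀ v, p.2.count v ≤ 1 := by
      intro v
      have hv := h3 v
      have hg := g3 v
      by_cases hvT : v ∈ D.take K <;> simp [hvT] at hv hg ⊢ <;> omega
    have hnd : p.2.Nodup := List.nodup_iff_count_le_one.mpr hcnt
    have e4 : PySem.Set.ofList p.2 = p.2 := PySem.Set.ofList_eq_self_of_nodup _ hnd
    have e3 : PySem.Set.ofList p.1 = p.1 := by
      rw [h1]; exact PySem.Set.ofList_eq_self_of_nodup _ hTnodup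
    have e1 : p.1.length = K := by rw [h1]; omega
    refine ⟨?_, ?_, ?_, ?_⟩
    · exact_mod_cast (by omega : p.1.length = p.2.length)
    · exact_mod_cast hlen2
    · rw [e3]; exact_mod_cast e1
    · rw [e4]; exact_mod_cast hlen2

-- B returns true exactly on: even length and every value occurs at most twice
lemma B_true_iff (nums : List Int) :
    splitsubarray_alt nums = true ↔
      nums.length % 2 = 0 ∧ ∀ v ∈ nums, nums.count v ≤ 2 := by
  have hlen : PySem.List.len nums = ((nums.length : Nat) : Int) := by
    simp [PySem.List.len]
  have hmod : PySem.Int.mod (PySem.List.len nums) 2 = ((nums.length % 2 : Nat) : Int) := by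
    rw [hlen]; exact_mod_cast PySem.Int.mod_natCast nums.length 2
  unfold splitsubarray_alt
  simp only [hmod, PySem.Dict.foldl_insert_getD_add_one_eq_counter]
  by_cases hpar : nums.length % 2 = 0
  · rw [if_neg (by simp [hpar] : ¬ ((nums.length % 2 : Nat) : Int) ≠ 0)]
    have hvals : (PySem.Dict.counter nums).values
        = (PySem.Set.ofList nums).map (fun k => ((nums.count k : Nat) : Int)) := by
      show ((PySem.Dict.counter nums).items).map (·.2) = _
      rw [PySem.Dict.items_counter, List.map_map]
      rfl
    rw [hvals, List.all_map, List.all_eq_true]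
    simp only [Function.comp_def, decide_eq_true_iff]
    constructor
    · intro h
      refine ⟨hpar, ?_⟩
      intro v hv
      have := h v ((PySem.Set.mem_ofList nums v).mpr hv)
      exact_mod_cast this
    · rintro ⟨-, h⟩ k hk
      exact_mod_cast h k ((PySem.Set.mem_ofList nums k).mp hk)
  · have : ((nums.length % 2 : Nat) : Int) ≠ 0 := by
      intro h; exact hpar (by exact_mod_cast h)
    rw [if_pos this]
    simp [hpar]

-- counts ≤ 2 forces at least n/2 distinct values
lemma distinct_ge_half (nums : List Int) (h : ∀ v ∈ nums, nums.count v ≤ 2) :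
    nums.length / 2 ≤ (PySem.Set.ofList nums).length := by
  have hperm : (PySem.Set.ofList nums).Perm nums.dedup := by
    rw [List.perm_ext_iff_of_nodup (PySem.Set.nodup_ofList nums) nums.nodup_dedup]
    intro a
    rw [PySem.Set.mem_ofList, List.mem_dedup]
  have hlen : (PySem.Set.ofList nums).length = nums.dedup.length := hperm.length_eq
  have hsum : (nums.dedup.map fun x => nums.count x).sum = nums.length :=
    List.sum_map_count_dedup_eq_length nums
  have hle : (nums.dedup.map fun x => nums.count x).sum
      ≤ (nums.dedup.map fun _ => 2).sum := by
    apply List.sum_le_sum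
    intro i hi
    exact h i (nums.mem_dedup.mp hi)
  have h2 : (nums.dedup.map fun _ : Int => 2).sum = 2 * nums.dedup.length := by
    simp [List.map_const', List.sum_replicate]
    ring
  omega

-- ===== VERDICT (by name: the statement is the Claim_ definition above) =====
theorem splitsubarray_spec : Claim_unchanged_splitsubarray := by
  intro nums _
  unfold Spec_splitsubarray
  intro hnd
  rw [Bool.eq_iff_iff, A_true_iff, B_true_iff]
  unfold GoodSplit
  constructor
  · rintro ⟨h1, _, h3⟩
    refine ⟨h1, ?_⟩
    intro v _
    have := h3 v
    split at this <;> omega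
  · rintro ⟨h1, h2⟩
    refine ⟨h1, distinct_ge_half nums h2, ?_⟩
    intro v
    by_cases hv : v ∈ nums
    · by_cases hT : v ∈ (PySem.Set.ofList nums).take (nums.length / 2)
      · rw [if_pos hT]; exact h2 v hv
      · rw [if_neg hT]
        by_contra hc
        exact hnd ⟨h1, h2, v, hv, by have := h2 v hv; omega, hT⟩
    · have : nums.count v = 0 := List.count_eq_zero_of_not_mem hv
      split <;> omega

theorem splitsubarray_changed : Claim_changed_splitsubarray := by
  unfold Claim_changed_splitsubarray; decide

theorem splitsubarray_tight : Claim_exact_splitsubarray := by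
  intro nums _ hd
  obtain ⟨h1, h2, v, hv, hc2, hT⟩ := hd
  have hB : splitsubarray_alt nums = true := (B_true_iff nums).mpr ⟨h1, h2⟩
  have hA : splitsubarray nums = false := by
    rw [Bool.eq_false_iff]
    intro hA
    obtain ⟨-, -, h3⟩ := (A_true_iff nums).mp hA
    have := h3 v
    rw [if_neg hT] at this
    omega
  rw [hA, hB]
  decide
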